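-- pv_equiv track=rewrite | github.com/ellkn/ssh_int-2 | app/ssh.py | parse_linux_info
-- ===== SOURCE A (Python) =====
-- def parse_linux_info(output, build, architecture):
--     """
--     Парсинг вывода команды 'cat /etc/os-release' для извлечения информации о системе.
--
--     Args:
--         output (str): Вывод команды 'cat /etc/os-release'.
--         build (str): Номер сборки.
--         architecture (str): Архитектура.
--
--     Returns:
--         dict: Словарь с информацией о системе, включая ОС, версию, номер сборки и архитектуру.
--               В случае ошибки во время парсинга, возвращает словарь с None в значениях.
--     """
--     try:
--         lines = output.split('\n')
--         for line in lines:
--             if line.startswith("VERSION="):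
--                 version = line.split('=')[1].strip('"\n')
--             if line.startswith("NAME="):
--                 os = line.split('=')[1].strip('"\n')
--
--         # lines = output.split()
--         # if len(lines) >= 4:
--         #     os = lines[0]
--         #     version = lines[2]
--         #     build = lines[9]
--             # architecture = lines[10]
--         return {
--             'os': os,
--             'version': version,
--             'build': build,
--             'architecture': architecture
--         }
--     except:
--         return {
--             'os': None,
--             'version': None,
--             'build': None,
--             'architecture': None
--         }
-- ===== SOURCE B (Python) =====
-- def parse_linux_info(output, build, architecture):
--     try:
--         fields = {}
--         for line in output.split('\n'):
--             if '=' in line: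
--                 fields[line.split('=')[0]] = line.split('=')[1].strip('"\n')
--         return {
--             'os': fields['NAME'],
--             'version': fields['VERSION'],
--             'build': build,
--             'architecture': architecture
--         }
--     except Exception:
--         return {
--             'os': None,
--             'version': None,
--             'build': None,
--             'architecture': None
--         }
-- ===== Notes on version B (the rewrite author's own statement) =====
-- stated objective: idiomatic
-- what changed: Instead of A's per-line prefix tests feeding two loose locals (whose possible unboundness the bare except catches), B builds a key->value dict from every 'k=v' line in one pass and then looks up NAME and VERSION, with the missing-key KeyError caught by the same except.
import Mathlib
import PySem

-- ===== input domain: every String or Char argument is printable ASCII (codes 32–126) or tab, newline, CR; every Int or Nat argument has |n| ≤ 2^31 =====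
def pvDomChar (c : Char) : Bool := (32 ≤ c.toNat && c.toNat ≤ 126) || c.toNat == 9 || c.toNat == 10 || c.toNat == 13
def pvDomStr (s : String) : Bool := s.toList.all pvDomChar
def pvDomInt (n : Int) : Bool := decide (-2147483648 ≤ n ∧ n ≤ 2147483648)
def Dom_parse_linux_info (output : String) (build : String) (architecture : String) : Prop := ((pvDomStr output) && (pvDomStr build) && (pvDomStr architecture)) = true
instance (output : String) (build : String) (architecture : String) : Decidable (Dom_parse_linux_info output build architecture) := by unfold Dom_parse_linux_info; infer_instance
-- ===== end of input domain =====

-- B rewrite: one pass that builds a key→value dict from every 'k=v' line, then two lookups,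
-- instead of A's per-line prefix tests with two loose variables (objective: idiomatic; same cost).

-- ===== PORT A =====
-- A's loop state: (version, os); 'none' = the Python local is still unbound (NameError at the
-- return, caught by the bare except → the all-None dict). The [1]? index on the '=' split is
-- guarded by the startswith test ('=' is in the line, so the split has ≥ 2 pieces): Python's
-- IndexError is unreachable there and '.getD ""' is exact.
def pvAStep (st : Option String × Option String) (line : String) : Option String × Option String :=
  let st := if PySem.Str.startswith line "VERSION=" then
      (some (PySem.Str.stripChars ((((PySem.Str.split? line "=").getD [])[1]?).getD "") "\"\n"), st.2)
    else st
  if PySem.Str.startswith line "NAME=" then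
    (st.1, some (PySem.Str.stripChars ((((PySem.Str.split? line "=").getD [])[1]?).getD "") "\"\n"))
  else st

def parse_linux_info (output : String) (build : String) (architecture : String) : List (String × Option String) :=
  let lines := (PySem.Str.split? output "\n").getD []
  match lines.foldl pvAStep (none, none) with
  | (some ver, some osName) =>
      [("os", some osName), ("version", some ver), ("build", some build), ("architecture", some architecture)]
  | _ => [("os", none), ("version", none), ("build", none), ("architecture", none)]

-- ===== PORT B =====
-- B's loop body: every line containing '=' stores split[0] ↦ split[1].strip('"\n') (last wins);
-- the missing-key KeyError of fields['NAME'] / fields['VERSION'] is the 'none' lookup below.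
def pvBStep (d : PySem.Dict String String) (line : String) : PySem.Dict String String :=
  if PySem.Str.isIn "=" line then
    d.insert ((((PySem.Str.split? line "=").getD [])[0]?).getD "")
      (PySem.Str.stripChars ((((PySem.Str.split? line "=").getD [])[1]?).getD "") "\"\n")
  else d

def parse_linux_info_alt (output : String) (build : String) (architecture : String) : List (String × Option String) :=
  let fields := ((PySem.Str.split? output "\n").getD []).foldl pvBStep PySem.Dict.empty
  match fields.get? "NAME" with
  | some osName =>
      match fields.get? "VERSION" with
      | some ver =>
          [("os", some osName), ("version", some ver), ("build", some build), ("architecture", some architecture)]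
      | none => [("os", none), ("version", none), ("build", none), ("architecture", none)]
  | none => [("os", none), ("version", none), ("build", none), ("architecture", none)]

-- ===== PRECONDITION & SPEC =====
def Spec_parse_linux_info (output : String) (build : String) (architecture : String) (out : List (String × Option String)) : Prop := out = parse_linux_info_alt output build architecture
instance (output : String) (build : String) (architecture : String) (out : List (String × Option String)) : Decidable (Spec_parse_linux_info output build architecture out) := by unfold Spec_parse_linux_info; infer_instance

-- ===== CLAIM (what is proved, stated in full; the proofs are below) =====
def Claim_equal_parse_linux_info : Prop := ∀ (output : String) (build : String) (architecture : String), Dom_parse_linux_info output build architecture → Spec_parse_linux_info output build architecture (parse_linux_info output build architecture)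

-- ===== LEMMAS AND PROOFS =====

-- proof-only model of Python's str.split with a one-character separator
def pvSplitChar (c : Char) : List Char → List (List Char)
  | [] => [[]]
  | a :: rest =>
      if a = c then [] :: pvSplitChar c rest
      else match pvSplitChar c rest with
        | [] => [[a]]
        | s :: ss => (a :: s) :: ss

theorem pvSplitChar_ne_nil (c : Char) (cs : List Char) : pvSplitChar c cs ≠ [] := by
  induction cs with
  | nil => simp [pvSplitChar]
  | cons a rest ih =>
      simp only [pvSplitChar]
      split_ifs
      · simp
      · match h : pvSplitChar c rest with
        | [] => exact absurd h ih
        | s :: ss => simp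

theorem pvSplitOn_go_eq (c : Char) (fuel : Nat) : ∀ (cs cur : List Char) (acc : List (List Char)),
    cs.length < fuel →
    PySem.Chars.splitOn.go [c] fuel cs cur acc =
      acc.reverse ++ (match pvSplitChar c cs with
        | [] => [cur.reverse]
        | s :: ss => (cur.reverse ++ s) :: ss) := by
  induction fuel with
  | zero => intro cs cur acc h; omega
  | succ fuel ih =>
      intro cs cur acc h
      match cs with
      | [] =>
          rw [PySem.Chars.splitOn.go.eq_def]
          simp [pvSplitChar]
      | a :: rest =>
          rw [PySem.Chars.splitOn.go.eq_def]
          simp only [List.isPrefixOf, List.length_cons] at *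
          by_cases hac : c = a
          · subst hac
            simp only [beq_self_eq_true, Bool.true_and, if_true]
            simp only [List.length_nil, List.drop, List.drop_zero]
            rw [ih rest [] (cur.reverse :: acc) (by omega)]
            simp only [pvSplitChar, if_pos]
            match h2 : pvSplitChar c rest with
            | [] => exact absurd h2 (pvSplitChar_ne_nil c rest)
            | s :: ss => simp
          · have : (c == a) = false := by simp [hac]
            simp only [this, Bool.false_and]
            rw [ih rest (a :: cur) acc (by omega)]
            simp only [pvSplitChar, if_neg (fun h' : a = c => hac h'.symm)]
            match h2 : pvSplitChar c rest with
            | [] => exact absurd h2 (pvSplitChar_ne_nil c rest)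
            | s :: ss => simp

theorem pvSplitOn_singleton (c : Char) (cs : List Char) :
    PySem.Chars.splitOn cs [c] = pvSplitChar c cs := by
  unfold PySem.Chars.splitOn
  rw [pvSplitOn_go_eq c (cs.length + 1) cs [] [] (by omega)]
  match h2 : pvSplitChar c cs with
  | [] => exact absurd h2 (pvSplitChar_ne_nil c cs)
  | s :: ss => simp

theorem pvSplitChar_head (c : Char) (cs : List Char) :
    ∃ ss, pvSplitChar c cs = (cs.takeWhile (fun a => a != c)) :: ss := by
  induction cs with
  | nil => exact ⟨[], rfl⟩
  | cons a rest ih =>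
      by_cases hac : a = c
      · subst hac
        refine ⟨pvSplitChar a rest, ?_⟩
        simp [pvSplitChar, List.takeWhile]
      · obtain ⟨ss, hss⟩ := ih
        refine ⟨ss, ?_⟩
        have hne : (a != c) = true := by simp [hac]
        simp [pvSplitChar, hss, List.takeWhile, hne, hac]

theorem pvTakeWhile_key (key t : List Char) (hk : '=' ∉ key) :
    (key ++ '=' :: t).takeWhile (fun a => a != '=') = key := by
  induction key with
  | nil => simp
  | cons a rest ih =>
      simp only [List.mem_cons, not_or] at hk
      have : (a != '=') = true := by simp; exact fun h => hk.1 h.symm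
      simp [this, ih hk.2]

-- the crux: "line starts with key=" ⟺ "'=' occurs in line and split('=')[0] = key"
theorem pvStartswith_iff (key cs : List Char) (hk : '=' ∉ key) :
    PySem.Chars.startswith cs (key ++ ['=']) = true ↔
      ('=' ∈ cs ∧ cs.takeWhile (fun a => a != '=') = key) := by
  constructor
  · intro h
    rw [PySem.Chars.startswith_iff] at h
    obtain ⟨t, rfl⟩ := h
    constructor
    · simp
    · simpa using pvTakeWhile_key key t hk
  · rintro ⟨hmem, htw⟩
    rw [PySem.Chars.startswith_iff]
    have hdw : cs.dropWhile (fun a => a != '=') ≠ [] := by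
      intro hnil
      have := List.takeWhile_append_dropWhile (p := fun a => a != '=') (l := cs)
      rw [hnil, List.append_nil, htw] at this
      exact hk (this ▸ hmem)
    have hhead := List.head_dropWhile_not (fun a => a != '=') hdw
    have hh : (cs.dropWhile (fun a => a != '=')).head hdw = '=' := by
      simpa using hhead
    have hsplit := List.takeWhile_append_dropWhile (p := fun a => a != '=') (l := cs)
    rw [htw] at hsplit
    refine ⟨(cs.dropWhile (fun a => a != '=')).tail, ?_⟩
    conv_rhs => rw [← hsplit, ← List.cons_head_tail hdw, hh]
    simp
    
theorem pvIsIn_eq_mem (cs : List Char) : PySem.Chars.isIn ['='] cs = true ↔ '=' ∈ cs := by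
  rw [PySem.Chars.isIn_iff_infix]
  constructor
  · intro h; exact h.mem (by simp)
  · intro h
    obtain ⟨s, t, rfl⟩ := List.mem_iff_append.mp h
    exact ⟨s, t, by simp⟩

-- string-level form, specialised to the key expression both ports share
theorem pvKey_iff (line key : String) (hk : '=' ∉ key.toList) :
    PySem.Str.startswith line (key ++ "=") = true ↔
      (PySem.Str.isIn "=" line = true ∧
        (((PySem.Str.split? line "=").getD [])[0]?).getD "" = key) := by
  obtain ⟨ss, hss⟩ := pvSplitChar_head '=' line.toList
  have hsp : PySem.Str.split? line "=" =
      some ((pvSplitChar '=' line.toList).map String.ofList) := by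
    simp [PySem.Str.split?, PySem.Chars.split?, pvSplitOn_singleton]
  have h0 : (((PySem.Str.split? line "=").getD [])[0]?).getD "" =
      String.ofList (line.toList.takeWhile (fun a => a != '=')) := by
    rw [hsp, hss]; rfl
  rw [h0]
  have hsw : PySem.Str.startswith line (key ++ "=") =
      PySem.Chars.startswith line.toList (key.toList ++ ['=']) := by
    simp [PySem.Str.startswith]
  have hin : PySem.Str.isIn "=" line = PySem.Chars.isIn ['='] line.toList := by
    simp [PySem.Str.isIn]
  rw [hsw, hin, pvStartswith_iff key.toList line.toList hk]
  constructor
  · rintro ⟨h1, h2⟩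
    exact ⟨(pvIsIn_eq_mem _).mpr h1, by rw [h2]; exact String.ofList_toList⟩
  · rintro ⟨h1, h2⟩
    refine ⟨(pvIsIn_eq_mem _).mp h1, ?_⟩
    have := congrArg String.toList h2
    rwa [String.toList_ofList] at this

theorem pvKeyN (line : String) :
    PySem.Str.startswith line "NAME=" = true ↔
      (PySem.Str.isIn "=" line = true ∧
        (((PySem.Str.split? line "=").getD [])[0]?).getD "" = "NAME") := by
  have h := pvKey_iff line "NAME" (by decide)
  rwa [show ("NAME" ++ "=" : String) = "NAME=" by decide] at h

theorem pvKeyV (line : String) :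
    PySem.Str.startswith line "VERSION=" = true ↔
      (PySem.Str.isIn "=" line = true ∧
        (((PySem.Str.split? line "=").getD [])[0]?).getD "" = "VERSION") := by
  have h := pvKey_iff line "VERSION" (by decide)
  rwa [show ("VERSION" ++ "=" : String) = "VERSION=" by decide] at h

-- the loop invariant: B's dict lookups track A's two locals
theorem pvLoop_inv (lines : List String) : ∀ (d : PySem.Dict String String) (ver osName : Option String),
    d.get? "NAME" = osName → d.get? "VERSION" = ver →
    (lines.foldl pvBStep d).get? "NAME" = (lines.foldl pvAStep (ver, osName)).2 ∧
    (lines.foldl pvBStep d).get? "VERSION" = (lines.foldl pvAStep (ver, osName)).1 := by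
  induction lines with
  | nil => intro d ver osName h1 h2; exact ⟨h1, h2⟩
  | cons line rest ih =>
      intro d ver osName h1 h2
      simp only [List.foldl_cons]
      by_cases hin : PySem.Str.isIn "=" line = true
      · set k := (((PySem.Str.split? line "=").getD [])[0]?).getD "" with hkdef
        set v := PySem.Str.stripChars ((((PySem.Str.split? line "=").getD [])[1]?).getD "") "\"\n" with hvdef
        have hB : pvBStep d line = d.insert k v := by
          simp only [pvBStep, hin]; rfl
        by_cases hkN : k = "NAME"
        · have hswN : PySem.Str.startswith line "NAME=" = true := (pvKeyN line).mpr ⟨hin, hkN⟩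
          have hswV : PySem.Str.startswith line "VERSION=" = false := by
            rw [← Bool.not_eq_true]; intro hc
            have := (pvKeyV line).mp hc
            rw [← hkdef, hkN] at this; exact absurd this.2 (by decide)
          have hA : pvAStep (ver, osName) line = (ver, some v) := by
            simp only [pvAStep]; rw [hswV, hswN]; rfl
          rw [hA, hB]
          exact ih _ _ _ (by rw [← hkN]; exact PySem.Dict.get?_insert_self d k v)
            (by rw [PySem.Dict.get?_insert_of_ne d v (by rw [hkN]; decide)]; exact h2)
        · by_cases hkV : k = "VERSION"
          · have hswV : PySem.Str.startswith line "VERSION=" = true := (pvKeyV line).mpr ⟨hin, hkV⟩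
            have hswN : PySem.Str.startswith line "NAME=" = false := by
              rw [← Bool.not_eq_true]; intro hc
              have := (pvKeyN line).mp hc
              rw [← hkdef, hkV] at this; exact absurd this.2 (by decide)
            have hA : pvAStep (ver, osName) line = (some v, osName) := by
              simp only [pvAStep]; rw [hswV, hswN]; rfl
            rw [hA, hB]
            exact ih _ _ _
              (by rw [PySem.Dict.get?_insert_of_ne d v (by rw [hkV]; decide)]; exact h1)
              (by rw [← hkV]; exact PySem.Dict.get?_insert_self d k v)
          · have hswN : PySem.Str.startswith line "NAME=" = false := by
              rw [← Bool.not_eq_true]; intro hc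
              exact hkN ((pvKeyN line).mp hc).2
            have hswV : PySem.Str.startswith line "VERSION=" = false := by
              rw [← Bool.not_eq_true]; intro hc
              exact hkV ((pvKeyV line).mp hc).2
            have hA : pvAStep (ver, osName) line = (ver, osName) := by
              simp only [pvAStep]; rw [hswV, hswN]; rfl
            rw [hA, hB]
            exact ih _ _ _
              (by rw [PySem.Dict.get?_insert_of_ne d v (fun h => hkN h.symm)]; exact h1)
              (by rw [PySem.Dict.get?_insert_of_ne d v (fun h => hkV h.symm)]; exact h2)
      · have hin' : PySem.Str.isIn "=" line = false := Bool.eq_false_iff.mpr hin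
        have hB : pvBStep d line = d := by simp only [pvBStep, hin']; rfl
        have hswN : PySem.Str.startswith line "NAME=" = false := by
          rw [← Bool.not_eq_true]; intro hc
          exact hin ((pvKeyN line).mp hc).1
        have hswV : PySem.Str.startswith line "VERSION=" = false := by
          rw [← Bool.not_eq_true]; intro hc
          exact hin ((pvKeyV line).mp hc).1
        have hA : pvAStep (ver, osName) line = (ver, osName) := by
          simp only [pvAStep]; rw [hswV, hswN]; rfl
        rw [hA, hB]
        exact ih _ _ _ h1 h2

-- ===== VERDICT (by name: the statement is the Claim_ definition above) =====
theorem parse_linux_info_spec : Claim_equal_parse_linux_info := by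
  intro output build architecture _
  unfold Spec_parse_linux_info parse_linux_info parse_linux_info_alt
  obtain ⟨h1, h2⟩ := pvLoop_inv ((PySem.Str.split? output "\n").getD [])
    PySem.Dict.empty none none rfl rfl
  simp only [h1, h2]
  cases List.foldl pvAStep (none, none) ((PySem.Str.split? output "\n").getD []) with
  | mk a b =>
      cases a <;> cases b <;> rfl
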